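-- pv_equiv track=rewrite | github.com/jordanjoewatson/payloadkit | src/utils.py | create_int_string
-- ===== SOURCE A (Python) =====
-- def create_int_string(payload):
--     intLs = []
--     for i in range(0, len(payload), 50):
--         intLs.append(','.join([
--             str(int(p)) for p in payload[i:i+50]
--         ]) + ',')
--
--     # remove the last character because of the trailint ','
--     intString = '\n'.join(intLs)[:-1]
--     return intString
-- ===== SOURCE B (Python) =====
-- def create_int_string(payload):
--     parts = []
--     for i, p in enumerate(payload):
--         if i:
--             parts.append(',\n' if i % 50 == 0 else ',')
--         parts.append(str(int(p)))
--     return ''.join(parts)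
-- ===== Notes on version B (the rewrite author's own statement) =====
-- stated objective: simpler
-- what changed: Replaced A's chunk-slicing loop (50-element slices each joined with ',' plus a trailing comma, '\n'-join of the chunks, then stripping the final character) by a single flat enumerate pass that emits the separator (',\n' at each positive multiple of 50, ',' otherwise) before each int string and joins once, with no trailing-comma fixup.
import Mathlib
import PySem

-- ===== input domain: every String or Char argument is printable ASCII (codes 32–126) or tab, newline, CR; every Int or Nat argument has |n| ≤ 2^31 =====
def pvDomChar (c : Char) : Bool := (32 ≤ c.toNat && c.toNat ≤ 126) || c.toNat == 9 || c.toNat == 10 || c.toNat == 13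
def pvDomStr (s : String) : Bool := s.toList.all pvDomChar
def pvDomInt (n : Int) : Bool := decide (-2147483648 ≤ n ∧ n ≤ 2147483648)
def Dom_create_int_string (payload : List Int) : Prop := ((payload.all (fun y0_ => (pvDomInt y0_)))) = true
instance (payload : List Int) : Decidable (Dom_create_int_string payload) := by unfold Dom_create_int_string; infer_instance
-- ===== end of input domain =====

-- B replaces A's chunk-slicing loop (50-slices, per-chunk trailing comma, '\n'-join, strip last char)
-- by one flat enumerate pass that emits the separator before each element; objective: simpler.

-- ===== PORT A =====
def create_int_string (payload : List Int) : String :=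
  let intLs : List String :=
    (PySem.List.pyRange 0 (payload.length : Int) 50).foldl
      (fun acc i =>
        acc ++ [PySem.Str.join ","
          ((PySem.List.slice payload (some i) (some (i + 50))).map PySem.Int.toStr) ++ ","])
      []
  PySem.Str.slice (PySem.Str.join "\n" intLs) none (some (-1))

-- ===== PORT B =====
def create_int_string_alt (payload : List Int) : String :=
  let parts : List String :=
    (PySem.List.enumerate payload 0).foldl
      (fun acc ip =>
        (if ip.1 ≠ 0 then
            acc ++ [if PySem.Int.mod ip.1 50 == 0 then ",\n" else ","]
          else acc) ++ [PySem.Int.toStr ip.2])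
      []
  PySem.Str.join "" parts

-- ===== PRECONDITION & SPEC =====
def Spec_create_int_string (payload : List Int) (out : String) : Prop := out = create_int_string_alt payload
instance (payload : List Int) (out : String) : Decidable (Spec_create_int_string payload out) := by unfold Spec_create_int_string; infer_instance

-- ===== CLAIM (what is proved, stated in full; the proofs are below) =====
def Claim_equal_create_int_string : Prop := ∀ (payload : List Int), Dom_create_int_string payload → Spec_create_int_string payload (create_int_string payload)

-- ===== LEMMAS AND PROOFS =====

-- A's loop result, as structural recursion over 50-chunks.
def pvChunks : List Int → List String
  | [] => []
  | p :: ps =>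
    (PySem.Str.join "," (((p :: ps).take 50).map PySem.Int.toStr) ++ ",") :: pvChunks (ps.drop 49)
termination_by l => l.length
decreasing_by simp

theorem pvChunks_eq (l : List Int) (h : l ≠ []) :
    pvChunks l = (PySem.Str.join "," ((l.take 50).map PySem.Int.toStr) ++ ",") :: pvChunks (l.drop 50) := by
  match l with
  | [] => exact absurd rfl h
  | p :: ps =>
    rw [pvChunks]
    rw [show (p :: ps).drop 50 = ps.drop 49 from by simp]

-- the flat separator-before-element form both programs produce (B directly, A after reassociation)
def pvGB : List Int → Int → List Char
  | [], _ => []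
  | p :: ps, i =>
      (if i = 0 then [] else if PySem.Int.mod i 50 == 0 then [',', '\n'] else [','])
        ++ PySem.Int.toChars p ++ pvGB ps (i + 1)

theorem pvFmod (i : Int) : i.fmod 50 = i % 50 := by
  rw [Int.fmod_eq_emod]; simp

theorem pvMod_lt (i : Int) (h1 : 1 ≤ i) (h2 : i ≤ 49) : (PySem.Int.mod i 50 == 0) = false := by
  simp only [PySem.Int.mod, pvFmod, beq_eq_false_iff_ne, ne_eq]
  omega

theorem pvMod_shift (i : Int) : PySem.Int.mod (i + 50) 50 = PySem.Int.mod i 50 := by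
  simp only [PySem.Int.mod, pvFmod]
  omega

-- inside one chunk (positions 1..49) every separator is a single comma
theorem pvGB_inner (c : List Int) : ∀ i : Int, 1 ≤ i → i + c.length ≤ 50 →
    pvGB c i = (c.map (fun p => ',' :: PySem.Int.toChars p)).flatten := by
  induction c with
  | nil => intro i _ _; rfl
  | cons p ps ih =>
    intro i h1 h2
    simp only [List.length_cons] at h2
    have hi0 : ¬ i = 0 := by omega
    rw [pvGB, if_neg hi0, pvMod_lt i h1 (by omega), if_neg (by simp),
      ih (i+1) (by omega) (by omega)]
    simp

theorem pvGB_append (a b : List Int) : ∀ i : Int,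
    pvGB (a ++ b) i = pvGB a i ++ pvGB b (i + a.length) := by
  induction a with
  | nil => intro i; simp [pvGB]
  | cons p ps ih =>
    intro i
    rw [List.cons_append, pvGB, pvGB, ih (i+1)]
    simp only [List.length_cons]
    have : i + 1 + (ps.length : Int) = i + ((ps.length : Int) + 1) := by ring
    rw [this]
    simp [List.append_assoc]

theorem pvGB_shift (xs : List Int) : ∀ i : Int, 1 ≤ i → pvGB xs (i + 50) = pvGB xs i := by
  induction xs with
  | nil => intro i _; rfl
  | cons p ps ih =>
    intro i h1
    rw [pvGB, pvGB, pvMod_shift, if_neg (show ¬ (i + 50 = 0) by omega),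
      if_neg (show ¬ (i = 0) by omega)]
    have h : i + 50 + 1 = (i + 1) + 50 := by ring
    rw [h, ih (i+1) (by omega)]

-- ','-joined int strings of a nonempty list = head ++ comma-prefixed rest
theorem pvJoin_comma (p : Int) (ps : List Int) :
    PySem.Chars.join [','] (((p :: ps).map PySem.Int.toStr).map String.toList)
      = PySem.Int.toChars p ++ (ps.map (fun q => ',' :: PySem.Int.toChars q)).flatten := by
  induction ps generalizing p with
  | nil => simp [PySem.Chars.join_singleton, PySem.Int.toList_toStr]
  | cons q qs ih =>
    simp only [List.map_cons] at ih ⊢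
    rw [PySem.Chars.join_cons_cons, ih q]
    simp [PySem.Int.toList_toStr]

theorem pvGB_head (p : Int) (ps : List Int) :
    pvGB (p :: ps) 0 = PySem.Int.toChars p ++ pvGB ps 1 := by
  rw [pvGB]; simp

theorem pvChunk_toList (c : List Int) (hne : c ≠ []) (hlen : c.length ≤ 50) :
    (PySem.Str.join "," ((c.map PySem.Int.toStr)) ++ ",").toList = pvGB c 0 ++ [','] := by
  match c with
  | p :: ps =>
    simp only [List.length_cons] at hlen
    rw [String.toList_append, PySem.Str.toList_join,
      show ("," : String).toList = [','] from rfl, pvJoin_comma,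
      pvGB_head, pvGB_inner ps 1 le_rfl (by omega), List.append_assoc]

-- A's '\n'-joined chunk strings = flat form plus the trailing comma the Python strips
theorem pvA_main : ∀ n (l : List Int), l.length ≤ n → l ≠ [] →
    PySem.Chars.join ['\n'] ((pvChunks l).map String.toList) = pvGB l 0 ++ [','] := by
  intro n
  induction n with
  | zero => intro l hn hne; cases l with
    | nil => exact absurd rfl hne
    | cons p ps => simp at hn
  | succ n ih =>
    intro l hn hne
    rw [pvChunks_eq l hne]
    by_cases hr : l.drop 50 = []
    · have hlen : l.length ≤ 50 := by
        by_contra h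
        exact absurd (List.eq_nil_iff_length_eq_zero.mp hr)
          (by simp; omega)
      have htake : l.take 50 = l := List.take_of_length_le hlen
      rw [htake, hr]
      simp only [pvChunks, List.map_cons, List.map_nil]
      rw [PySem.Chars.join_singleton, pvChunk_toList l hne hlen]
    · have hlen : 50 < l.length := by
        by_contra h
        exact hr (List.drop_eq_nil_of_le (by omega))
      have hrec : PySem.Chars.join ['\n'] ((pvChunks (l.drop 50)).map String.toList)
          = pvGB (l.drop 50) 0 ++ [','] := by
        have hdl : (List.drop 50 l).length = l.length - 50 := by simp
        apply ih (l.drop 50) (by omega) hr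
      have hsplit : l = l.take 50 ++ l.drop 50 := (List.take_append_drop 50 l).symm
      have hctl : (PySem.Str.join "," (((l.take 50)).map PySem.Int.toStr) ++ ",").toList
          = pvGB (l.take 50) 0 ++ [','] := by
        apply pvChunk_toList
        · intro hnil
          have h0 : (l.take 50).length = 0 := by rw [hnil]; rfl
          rw [List.length_take] at h0
          omega
        · simp
      obtain ⟨q, qs, hq⟩ : ∃ q qs, pvChunks (l.drop 50) = q :: qs := by
        rw [pvChunks_eq _ hr]; exact ⟨_, _, rfl⟩
      rw [hq] at hrec
      rw [hq]
      simp only [List.map_cons] at hrec ⊢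
      rw [PySem.Chars.join_cons_cons, hrec, hctl]
      -- right-hand side: split pvGB l 0 at the chunk boundary
      conv_rhs => rw [hsplit]
      rw [pvGB_append]
      obtain ⟨r, rs, hrr⟩ : ∃ r rs, l.drop 50 = r :: rs := by
        cases h : l.drop 50 with
        | nil => exact absurd h hr
        | cons r rs => exact ⟨r, rs, rfl⟩
      have hlt : (l.take 50).length = 50 := by simp; omega
      have hlt' : (((l.take 50).length : Nat) : Int) = (50 : Int) := by exact_mod_cast hlt
      have hGB50 : pvGB (r :: rs) ((0:Int) + 50) = [','] ++ ['\n'] ++ pvGB (r :: rs) 0 := by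
        rw [pvGB, pvGB]
        rw [if_neg (show ¬ ((0:Int) + 50 = 0) by norm_num),
          if_pos (show ((PySem.Int.mod ((0:Int) + 50) 50 == 0) = true) from by decide),
          if_pos rfl]
        rw [show (0:Int) + 50 + 1 = 1 + 50 from by norm_num, pvGB_shift rs 1 le_rfl]
        simp
      rw [hlt', hrr, hGB50]
      simp

-- empty separator join is flatten
theorem pvJoin_empty (parts : List (List Char)) :
    PySem.Chars.join [] parts = parts.flatten := by
  induction parts with
  | nil => rfl
  | cons p rest ih =>
    cases rest with
    | nil => simp [PySem.Chars.join_singleton]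
    | cons q qs =>
      rw [PySem.Chars.join_cons_cons, ih]
      simp

-- B's loop, at positive start index, appends pvGB to the accumulator
theorem pvB_loop (ps : List Int) : ∀ (s : Int) (acc : List String), 1 ≤ s →
    ((((PySem.List.enumerate ps s).foldl
      (fun acc ip =>
        (if ip.1 ≠ 0 then
            acc ++ [if PySem.Int.mod ip.1 50 == 0 then ",\n" else ","]
          else acc) ++ [PySem.Int.toStr ip.2]) acc).map String.toList).flatten)
    = ((acc.map String.toList).flatten) ++ pvGB ps s := by
  induction ps with
  | nil => intro s acc _; simp [PySem.List.enumerate, pvGB]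
  | cons p ps ih =>
    intro s acc hs
    have henum : PySem.List.enumerate (p :: ps) s = (s, p) :: PySem.List.enumerate ps (s+1) := rfl
    rw [henum, List.foldl_cons, ih (s+1) _ (by omega), pvGB]
    rw [if_neg (by omega : ¬ s = 0)]
    simp only [if_pos (by omega : s ≠ 0)]
    by_cases hm : PySem.Int.mod s 50 == 0
    · rw [if_pos hm, if_pos (by simpa using hm)]
      simp [PySem.Int.toList_toStr]
    · rw [if_neg hm, if_neg (by simpa using hm)]
      simp [PySem.Int.toList_toStr]

theorem pvB_toList (payload : List Int) :
    (create_int_string_alt payload).toList = pvGB payload 0 := by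
  unfold create_int_string_alt
  rw [PySem.Str.toList_join, show ("" : String).toList = ([] : List Char) from rfl, pvJoin_empty]
  cases payload with
  | nil => rfl
  | cons p ps =>
    have henum : PySem.List.enumerate (p :: ps) 0 = ((0:Int), p) :: PySem.List.enumerate ps 1 := rfl
    rw [henum, List.foldl_cons]
    have hstep : ((if (((0:Int), p)).1 ≠ 0 then
          ([] : List String) ++ [if PySem.Int.mod (((0:Int), p)).1 50 == 0 then ",\n" else ","]
        else []) ++ [PySem.Int.toStr (((0:Int), p)).2]) = [PySem.Int.toStr p] := by
      norm_num
    rw [hstep, pvB_loop ps 1 [PySem.Int.toStr p] le_rfl, pvGB_head]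
    simp [PySem.Int.toList_toStr]

-- cons step of a stride-50 range
theorem pvRange_cons (a b : Int) (h : a < b) :
    PySem.List.pyRange a b 50 = a :: PySem.List.pyRange (a + 50) b 50 := by
  rw [PySem.List.pyRange_of_pos _ _ (by norm_num : (0:Int) < 50),
      PySem.List.pyRange_of_pos _ _ (by norm_num : (0:Int) < 50), if_pos h]
  by_cases hb : a + 50 < b
  · rw [if_pos hb]
    have hq : ((b - a + 50 - 1) / 50).toNat = ((b - (a + 50) + 50 - 1) / 50).toNat + 1 := by
      omega
    rw [hq, List.range_succ_eq_map, List.map_cons, List.map_map]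
    simp only [List.cons.injEq]
    constructor
    · norm_num
    · apply List.map_congr_left
      intro x _
      simp only [Function.comp_apply]
      push_cast
      ring
  · rw [if_neg hb]
    have hq : ((b - a + 50 - 1) / 50).toNat = 1 := by omega
    rw [hq]
    simp

-- A's index loop over range(0, len, 50) is the chunk recursion pvChunks
theorem pvA_loop (payload : List Int) : ∀ n (k : Nat) (acc : List String),
    payload.length ≤ k + n →
    ((PySem.List.pyRange (k : Int) (payload.length : Int) 50).foldl
      (fun acc i =>
        acc ++ [PySem.Str.join ","
          ((PySem.List.slice payload (some i) (some (i + 50))).map PySem.Int.toStr) ++ ","]) acc)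
    = acc ++ pvChunks (payload.drop k) := by
  intro n
  induction n with
  | zero =>
    intro k acc h
    have h1 : payload.drop k = [] := List.drop_eq_nil_of_le (by omega)
    have h2 : PySem.List.pyRange (k : Int) (payload.length : Int) 50 = [] := by
      rw [PySem.List.pyRange_of_pos _ _ (by norm_num)]
      rw [if_neg (by omega)]
      simp
    rw [h1, h2]; simp [pvChunks]
  | succ n ih =>
    intro k acc h
    by_cases hk : payload.length ≤ k
    · have h1 : payload.drop k = [] := List.drop_eq_nil_of_le hk
      have h2 : PySem.List.pyRange (k : Int) (payload.length : Int) 50 = [] := by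
        rw [PySem.List.pyRange_of_pos _ _ (by norm_num)]
        rw [if_neg (by omega)]
        simp
      rw [h1, h2]; simp [pvChunks]
    · have hk' : k < payload.length := by omega
      have hcons := pvRange_cons (k : Int) (payload.length : Int) (by exact_mod_cast hk')
      have hcast : (k : Int) + 50 = ((k + 50 : Nat) : Int) := by push_cast; ring
      rw [hcast] at hcons
      rw [hcons, List.foldl_cons]
      have hslice : PySem.List.slice payload (some (k : Int)) (some ((k : Int) + 50))
          = (payload.drop k).take 50 := by
        have h5 : ((k : Int) + 50) = ((k : Int) + ((50 : Nat) : Int)) := by norm_num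
        rw [h5, PySem.List.slice_natCast_add]
      rw [hslice, ih (k + 50) _ (by omega)]
      rw [pvChunks_eq (payload.drop k) (by
        intro hnil
        have := List.eq_nil_iff_length_eq_zero.mp hnil
        simp at this; omega)]
      have hdd : (payload.drop k).drop 50 = payload.drop (k + 50) := by
        rw [List.drop_drop]
      rw [hdd]
      simp

theorem pvA_toList (payload : List Int) :
    (create_int_string payload).toList = pvGB payload 0 := by
  unfold create_int_string
  rw [PySem.Str.slice_to_neg_one]
  have hloop := pvA_loop payload payload.length 0 [] (Nat.le_add_left _ _)
  simp only [Nat.cast_zero, List.drop_zero, List.nil_append] at hloop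
  rw [hloop]
  rw [PySem.Str.toList_join, show ("\n" : String).toList = ['\n'] from rfl]
  cases payload with
  | nil => simp [pvChunks, PySem.Chars.join_nil, pvGB]
  | cons p ps =>
    rw [pvA_main (p :: ps).length (p :: ps) le_rfl (by simp)]
    rw [List.dropLast_concat]

-- ===== VERDICT (by name: the statement is the Claim_ definition above) =====
theorem create_int_string_spec : Claim_equal_create_int_string := by
  intro payload _
  unfold Spec_create_int_string
  apply String.toList_inj.mp
  rw [pvA_toList, pvB_toList]
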